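-- pv_equiv track=rewrite | github.com/public-arch/Marithmetics | zz_archive/authority_archive/_archive/AOR_20260124T144253Z_32dfb85/GUM_BUNDLE_v30_20260124T144253Z/capsules/DEMO-40/demo.py | from_base_digits
-- ===== SOURCE A (Python) =====
-- from typing import Dict, Iterable, List, Sequence, Tuple
--
-- def from_base_digits(digs: Sequence[int], base: int) -> int:
--     if base < 2:
--         raise ValueError("base must be >= 2")
--     x = 0
--     for d in digs:
--         if d < 0 or d >= base:
--             raise ValueError("digit out of range")
--         x = x * base + int(d)
--     return int(x)
-- ===== SOURCE B (Python) =====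
-- def from_base_digits(digs, base):
--     if base < 2:
--         raise ValueError("base must be >= 2")
--     total = 0
--     w = 1
--     for d in reversed(digs):
--         if d < 0 or d >= base:
--             raise ValueError("digit out of range")
--         total += int(d) * w
--         w *= base
--     return int(total)
-- ===== Notes on version B (the rewrite author's own statement) =====
-- stated objective: alternative
-- what changed: Replaces Horner's accumulate-and-multiply left-to-right pass with a least-significant-first pass over reversed(digs) maintaining an explicit positional weight w and a running weighted sum.
import Mathlib
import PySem

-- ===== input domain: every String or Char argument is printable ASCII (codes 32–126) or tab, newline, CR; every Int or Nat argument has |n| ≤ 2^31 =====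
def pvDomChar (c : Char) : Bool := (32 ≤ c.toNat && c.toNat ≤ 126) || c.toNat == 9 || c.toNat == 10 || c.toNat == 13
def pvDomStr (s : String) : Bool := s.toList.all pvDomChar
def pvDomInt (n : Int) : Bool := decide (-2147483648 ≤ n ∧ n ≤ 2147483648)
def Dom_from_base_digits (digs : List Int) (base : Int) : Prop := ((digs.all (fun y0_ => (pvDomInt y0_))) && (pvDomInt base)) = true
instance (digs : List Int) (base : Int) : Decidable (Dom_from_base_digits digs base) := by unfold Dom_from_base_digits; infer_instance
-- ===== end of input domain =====

-- B differs from A only in decomposition (explicit weights, LSB-first), not in side effects: both raise ValueError on base < 2 or an out-of-range digit (excluded by Pre_).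

-- ===== PORT A =====
-- Horner: x = x * base + d over digs left to right (the raising branches are outside Pre_).
def from_base_digits (digs : List Int) (base : Int) : Int :=
  if base < 2 then 0
  else digs.foldl (fun x d => x * base + d) 0

-- ===== PORT B =====
-- Weighted sum over reversed digs, state (total, w).
def from_base_digits_alt (digs : List Int) (base : Int) : Int :=
  if base < 2 then 0
  else (digs.reverse.foldl (fun (s : Int × Int) d => (s.1 + d * s.2, s.2 * base)) (0, 1)).1

-- ===== PRECONDITION & SPEC =====
-- Pre_ excludes exactly the inputs where A (and B) raise ValueError: base < 2 or a digit outside [0, base).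
def Pre_from_base_digits (digs : List Int) (base : Int) : Prop :=
  2 ≤ base ∧ ∀ d ∈ digs, 0 ≤ d ∧ d < base
instance (digs : List Int) (base : Int) : Decidable (Pre_from_base_digits digs base) := by unfold Pre_from_base_digits; infer_instance
def pvWitness_from_base_digits : List Int × Int := ([1, 0, 1], 2)

def Spec_from_base_digits (digs : List Int) (base : Int) (out : Int) : Prop := out = from_base_digits_alt digs base
instance (digs : List Int) (base : Int) (out : Int) : Decidable (Spec_from_base_digits digs base out) := by unfold Spec_from_base_digits; infer_instance

-- ===== CLAIM (what is proved, stated in full; the proofs are below) =====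
def Claim_equal_from_base_digits : Prop := ∀ (digs : List Int) (base : Int), Dom_from_base_digits digs base → Pre_from_base_digits digs base → Spec_from_base_digits digs base (from_base_digits digs base)

-- ===== LEMMAS AND PROOFS =====

lemma pv_snd_foldl (base : Int) : ∀ (l : List Int) (s : Int × Int),
    (l.foldl (fun (s : Int × Int) d => (s.1 + d * s.2, s.2 * base)) s).2 = s.2 * base ^ l.length := by
  intro l
  induction l with
  | nil => intro s; simp
  | cons d t ih =>
      intro s
      simp only [List.foldl_cons, ih, List.length_cons]
      ring

lemma pv_horner_eq_weighted (base : Int) : ∀ (digs : List Int) (x : Int),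
    digs.foldl (fun x d => x * base + d) x
      = x * base ^ digs.length
        + (digs.reverse.foldl (fun (s : Int × Int) d => (s.1 + d * s.2, s.2 * base)) (0, 1)).1 := by
  intro digs
  induction digs with
  | nil => intro x; simp
  | cons d t ih =>
      intro x
      simp only [List.foldl_cons, List.reverse_cons, List.foldl_append, List.foldl_cons,
        List.foldl_nil, List.length_cons]
      rw [ih]
      rw [pv_snd_foldl]
      simp only [List.length_reverse]
      ring

-- ===== VERDICT (by name: the statement is the Claim_ definition above) =====
theorem from_base_digits_spec : Claim_equal_from_base_digits := by
  intro digs base _ _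
  unfold Spec_from_base_digits from_base_digits from_base_digits_alt
  split
  · rfl
  · rw [pv_horner_eq_weighted]
    ring
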